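-- pv_equiv track=rewrite | github.com/emmettmeinzer/hmwgen | thesis_final.py | get_acceptable_words
-- ===== SOURCE A (Python) =====
-- corpus = []
--
-- def get_acceptable_words(corpus):
--     all_words = []
--     for i in range(len(corpus)):
--         all_words.append(corpus[i].split())
--
--     all_words = [i for sub in all_words for i in sub]
--
--     acceptable_words = []
--     for i in all_words:
--         if not i in acceptable_words:
--             acceptable_words.append(i)
--
--     return sorted(acceptable_words)
-- ===== SOURCE B (Python) =====
-- def get_acceptable_words(corpus):
--     words = sorted(w for line in corpus for w in line.split())
--     out = []
--     for w in words:
--         if not out or out[-1] != w: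
--             out.append(w)
--     return out
-- ===== Notes on version B (the rewrite author's own statement) =====
-- stated objective: faster
-- what changed: A dedups first with a quadratic membership scan (word in list) and then sorts; B flattens, sorts everything once, and dedups in one linear pass by comparing each word with the last one appended.
import Mathlib
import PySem

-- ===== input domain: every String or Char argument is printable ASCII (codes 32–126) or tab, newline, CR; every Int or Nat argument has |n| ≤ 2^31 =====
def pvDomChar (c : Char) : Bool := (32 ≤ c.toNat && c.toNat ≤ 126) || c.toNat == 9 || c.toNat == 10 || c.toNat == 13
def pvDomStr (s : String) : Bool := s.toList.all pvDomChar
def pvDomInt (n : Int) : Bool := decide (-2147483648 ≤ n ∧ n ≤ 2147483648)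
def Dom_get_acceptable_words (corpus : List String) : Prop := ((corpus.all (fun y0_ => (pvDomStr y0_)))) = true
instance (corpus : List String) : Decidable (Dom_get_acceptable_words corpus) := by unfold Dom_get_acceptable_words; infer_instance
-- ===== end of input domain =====

-- B sorts the flattened word list once and dedups with a single adjacent-comparison pass,
-- replacing A's quadratic membership-scan dedup (objective: faster).

-- ===== PORT A =====
def get_acceptable_words (corpus : List String) : List String :=
  -- for i in range(len(corpus)): all_words.append(corpus[i].split())
  -- (the index i is always in range, so pyGetD's default is never used)
  let all_words : List (List String) :=
    (PySem.List.pyRange 0 (corpus.length : Int) 1).foldl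
      (fun acc i => acc ++ [PySem.Str.split₀ (PySem.List.pyGetD corpus i "")]) []
  -- all_words = [i for sub in all_words for i in sub]
  let flat : List String := all_words.foldl (fun acc sub => acc ++ sub) []
  -- for i in all_words: if not i in acceptable_words: acceptable_words.append(i)
  let acceptable_words : List String :=
    flat.foldl (fun acc i => if i ∈ acc then acc else acc ++ [i]) []
  PySem.List.sorted acceptable_words (fun x => x) false

-- ===== PORT B =====
def get_acceptable_words_alt (corpus : List String) : List String :=
  let words : List String :=
    PySem.List.sorted (corpus.flatMap (fun line => PySem.Str.split₀ line)) (fun x => x) false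
  words.foldl (fun out w => if out = [] ∨ out.getLast? ≠ some w then out ++ [w] else out) []

-- ===== PRECONDITION & SPEC =====
def Spec_get_acceptable_words (corpus : List String) (out : List String) : Prop := out = get_acceptable_words_alt corpus
instance (corpus : List String) (out : List String) : Decidable (Spec_get_acceptable_words corpus out) := by unfold Spec_get_acceptable_words; infer_instance

-- ===== CLAIM (what is proved, stated in full; the proofs are below) =====
def Claim_equal_get_acceptable_words : Prop := ∀ (corpus : List String), Dom_get_acceptable_words corpus → Spec_get_acceptable_words corpus (get_acceptable_words corpus)

-- ===== LEMMAS AND PROOFS =====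

-- A's index loop + flattening comprehension build exactly the flatMap of split₀.
theorem flatA_eq (corpus : List String) :
    (((PySem.List.pyRange 0 (corpus.length : Int) 1).foldl
        (fun acc i => acc ++ [PySem.Str.split₀ (PySem.List.pyGetD corpus i "")]) []).foldl
      (fun acc sub => acc ++ sub) [])
    = corpus.flatMap (fun line => PySem.Str.split₀ line) := by
  rw [PySem.List.foldl_pyRange_zero_pyGetD' corpus "" (fun acc s => acc ++ [PySem.Str.split₀ s]) []]
  have h1 : ∀ (xs : List String) (acc : List (List String)),
      xs.foldl (fun acc s => acc ++ [PySem.Str.split₀ s]) acc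
        = acc ++ xs.map (fun s => PySem.Str.split₀ s) := by
    intro xs
    induction xs with
    | nil => simp
    | cons x t ih => intro acc; simp [List.foldl_cons, ih]
  have h2 : ∀ (ls : List (List String)) (acc : List String),
      ls.foldl (fun acc sub => acc ++ sub) acc = acc ++ ls.flatten := by
    intro ls
    induction ls with
    | nil => simp
    | cons l t ih => intro acc; simp [List.foldl_cons, ih]
  rw [h1, h2]
  simp [List.flatMap]

-- membership in A's dedup accumulator
theorem mem_dedupA (xs : List String) (acc : List String) (x : String) :
    x ∈ xs.foldl (fun acc i => if i ∈ acc then acc else acc ++ [i]) acc ↔ x ∈ acc ∨ x ∈ xs := by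
  induction xs generalizing acc with
  | nil => simp
  | cons y t ih =>
    simp only [List.foldl_cons]
    by_cases hy : y ∈ acc
    · rw [if_pos hy, ih]
      have hxy : x = y → x ∈ acc := fun h => h ▸ hy
      simp only [List.mem_cons]
      tauto
    · rw [if_neg hy, ih]
      simp only [List.mem_append, List.mem_cons]
      tauto

theorem nodup_dedupA (xs : List String) (acc : List String) (h : acc.Nodup) :
    (xs.foldl (fun acc i => if i ∈ acc then acc else acc ++ [i]) acc).Nodup := by
  induction xs generalizing acc with
  | nil => simpa
  | cons y t ih =>
    simp only [List.foldl_cons]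
    by_cases hy : y ∈ acc
    · rw [if_pos hy]; exact ih acc h
    · rw [if_neg hy]
      refine ih _ ?_
      rw [List.nodup_append]
      refine ⟨h, List.nodup_singleton _, ?_⟩
      intro a ha b hb
      rcases List.mem_cons.mp hb with rfl | h'
      · exact fun hEq => hy (hEq ▸ ha)
      · simp at h'

-- membership in B's adjacent-dedup accumulator
theorem mem_adjDedup (xs : List String) (acc : List String) (x : String) :
    x ∈ xs.foldl (fun out w => if out = [] ∨ out.getLast? ≠ some w then out ++ [w] else out) acc
      ↔ x ∈ acc ∨ x ∈ xs := by
  induction xs generalizing acc with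
  | nil => simp
  | cons y t ih =>
    simp only [List.foldl_cons]
    by_cases hc : acc = [] ∨ acc.getLast? ≠ some y
    · rw [if_pos hc, ih]
      simp only [List.mem_append, List.mem_cons]
      tauto
    · rw [if_neg hc, ih]
      have hlast : acc.getLast? = some y := not_not.mp (not_or.mp hc).2
      have hy : y ∈ acc := List.mem_of_getLast? hlast
      have hxy : x = y → x ∈ acc := fun h => h ▸ hy
      simp only [List.mem_cons]
      tauto

theorem le_getLast_of_pairwise_lt (l : List String) (m : String)
    (h : l.Pairwise (· < ·)) (hm : l.getLast? = some m) : ∀ a ∈ l, a ≤ m := by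
  induction l with
  | nil => simp at hm
  | cons x t ih =>
    cases t with
    | nil =>
      simp at hm
      intro a ha
      simp at ha
      simp [ha, hm]
    | cons y u =>
      have hm' : (y :: u).getLast? = some m := by
        rw [List.getLast?_cons_cons] at hm; exact hm
      have ht := (List.pairwise_cons.mp h).2
      intro a ha
      rcases List.mem_cons.mp ha with rfl | ha'
      · exact le_of_lt ((List.pairwise_cons.mp h).1 m (List.mem_of_getLast? hm'))
      · exact ih ht hm' a ha'

-- B's pass over a ≤-sorted list is strictly increasing
theorem pairwise_adjDedup (xs : List String) (acc : List String)
    (hacc : acc.Pairwise (· < ·))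
    (hxs : xs.Pairwise (· ≤ ·))
    (hsep : ∀ a ∈ acc, ∀ s ∈ xs, a ≤ s) :
    (xs.foldl (fun out w => if out = [] ∨ out.getLast? ≠ some w then out ++ [w] else out) acc).Pairwise (· < ·) := by
  induction xs generalizing acc with
  | nil => simp only [List.foldl_nil]; exact hacc
  | cons y t ih =>
    simp only [List.foldl_cons]
    have hyt := (List.pairwise_cons.mp hxs).1
    have hxt := (List.pairwise_cons.mp hxs).2
    by_cases hc : acc = [] ∨ acc.getLast? ≠ some y
    · rw [if_pos hc]
      refine ih (acc ++ [y]) ?_ hxt ?_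
      · rw [List.pairwise_append]
        refine ⟨hacc, List.pairwise_singleton _ _, ?_⟩
        intro a ha b hb
        simp only [List.mem_singleton] at hb
        rw [hb]
        rcases hc with hnil | hlast
        · subst hnil; simp at ha
        · cases hgl : acc.getLast? with
          | none => rw [List.getLast?_eq_none_iff] at hgl; subst hgl; simp at ha
          | some m =>
            have ham := le_getLast_of_pairwise_lt acc m hacc hgl a ha
            have hmy : m ≤ y := hsep m (List.mem_of_getLast? hgl) y (List.mem_cons_self ..)
            have hne : m ≠ y := fun hEq => hlast (by rw [hgl, hEq])
            exact lt_of_le_of_lt ham (lt_of_le_of_ne hmy hne)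
      · intro a ha s hs
        rcases List.mem_append.mp ha with ha' | ha'
        · exact hsep a ha' s (List.mem_cons_of_mem _ hs)
        · simp only [List.mem_singleton] at ha'
          subst ha'
          exact hyt s hs
    · rw [if_neg hc]
      exact ih acc hacc hxt (fun a ha s hs => hsep a ha s (List.mem_cons_of_mem _ hs))

-- ===== VERDICT (by name: the statement is the Claim_ definition above) =====
theorem get_acceptable_words_spec : Claim_equal_get_acceptable_words := by
  intro corpus _
  unfold Spec_get_acceptable_words get_acceptable_words get_acceptable_words_alt
  simp only [flatA_eq]
  set xs := corpus.flatMap (fun line => PySem.Str.split₀ line) with hxs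
  set dA := xs.foldl (fun acc i => if i ∈ acc then acc else acc ++ [i]) [] with hdA
  set S := PySem.List.sorted xs (fun x => x) false with hS
  set dB := S.foldl (fun out w => if out = [] ∨ out.getLast? ≠ some w then out ++ [w] else out) [] with hdB
  have hBpair : dB.Pairwise (· < ·) := by
    refine pairwise_adjDedup S [] (by simp) ?_ (by simp)
    simpa using PySem.List.sorted_pairwise xs (fun x => x)
  have hmem : ∀ x, x ∈ dB ↔ x ∈ dA := by
    intro x
    rw [hdB, hdA, mem_adjDedup, mem_dedupA]
    simp [hS, PySem.List.mem_sorted]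
  have hAnodup : dA.Nodup := nodup_dedupA xs [] (by simp)
  have hBnodup : dB.Nodup := hBpair.imp ne_of_lt
  have hperm : dB.Perm dA := (List.perm_ext_iff_of_nodup hBnodup hAnodup).mpr hmem
  exact PySem.List.sorted_eq_of_perm_of_pairwise_lt dA dB (fun x => x) hperm (by simpa using hBpair)
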